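-- pv_equiv track=rewrite | github.com/Akash-Kadali/ASTRA.AI | backend/api/optimize.py | replace_resume_items
-- ===== SOURCE A (Python) =====
-- from typing import List, Tuple, Dict, Iterable, Optional, Set, Any
--
-- def find_resume_items(block: str) -> List[Tuple[int, int, int, int]]:
--     out: List[Tuple[int, int, int, int]] = []
--     i = 0
--     macro = r"\resumeItem"
--     n = len(macro)
--     while True:
--         i = block.find(macro, i)
--         if i < 0:
--             break
--         j = i + n
--         while j < len(block) and block[j].isspace():
--             j += 1
--         if j >= len(block) or block[j] != "{":
--             i = j
--             continue
--         open_b = j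
--         depth, k = 0, open_b
--         while k < len(block):
--             if block[k] == "{":
--                 depth += 1
--             elif block[k] == "}":
--                 depth -= 1
--                 if depth == 0:
--                     out.append((i, open_b, k, k + 1))
--                     i = k + 1
--                     break
--             k += 1
--         else:
--             break
--     return out
--
-- def replace_resume_items(block: str, replacements: List[str]) -> str:
--     items = find_resume_items(block)
--     if not items:
--         return block
--     if len(replacements) < len(items):
--         replacements = replacements + [None] * (len(items) - len(replacements))
--     out: List[str] = []
--     last = 0
--     for (start, open_b, close_b, end), newtxt in zip(items, replacements):
--         out.append(block[last:open_b + 1])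
--         out.append(newtxt if newtxt is not None else block[open_b + 1:close_b])
--         out.append(block[close_b:end])
--         last = end
--     out.append(block[last:])
--     return "".join(out)
-- ===== SOURCE B (Python) =====
-- def replace_resume_items(block, replacements):
--     macro = "\\resumeItem"
--     n = len(macro)
--     out = []
--     last = 0
--     count = 0
--     i = 0
--     while True:
--         f = block.find(macro, i)
--         if f < 0:
--             break
--         j = f + n
--         while j < len(block) and block[j].isspace():
--             j += 1
--         if j >= len(block) or block[j] != "{":
--             i = j
--             continue
--         depth = 0
--         k = j
--         closed = -1
--         while k < len(block):
--             c = block[k]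
--             if c == "{":
--                 depth += 1
--             elif c == "}":
--                 depth -= 1
--                 if depth == 0:
--                     closed = k
--                     break
--             k += 1
--         if closed < 0:
--             break
--         out.append(block[last:j + 1])
--         out.append(replacements[count] if count < len(replacements) else block[j + 1:closed])
--         out.append(block[closed:closed + 1])
--         count += 1
--         last = closed + 1
--         i = closed + 1
--     out.append(block[last:])
--     return "".join(out)
-- ===== Notes on version B (the rewrite author's own statement) =====
-- stated objective: simpler
-- what changed: B fuses A's two passes into one: instead of building a table of (start, open, close, end) item tuples and then zipping it against a None-padded copy of the replacements, B emits the output pieces immediately while scanning, keeping only a copy position and a replacement counter (no table, no zip, no None padding).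
import Mathlib
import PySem

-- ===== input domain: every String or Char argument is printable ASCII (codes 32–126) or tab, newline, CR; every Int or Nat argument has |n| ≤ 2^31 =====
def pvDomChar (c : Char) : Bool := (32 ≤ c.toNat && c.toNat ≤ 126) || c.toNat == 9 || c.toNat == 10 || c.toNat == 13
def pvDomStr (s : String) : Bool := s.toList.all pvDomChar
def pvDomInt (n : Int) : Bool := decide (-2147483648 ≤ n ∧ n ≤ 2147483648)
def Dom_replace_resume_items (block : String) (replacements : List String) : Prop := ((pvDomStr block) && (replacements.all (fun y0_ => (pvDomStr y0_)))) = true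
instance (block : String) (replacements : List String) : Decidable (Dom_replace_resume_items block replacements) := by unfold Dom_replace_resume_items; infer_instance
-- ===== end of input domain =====

-- B fuses A's two passes (item-table construction, then zip-with-padding rendering) into one
-- scan that emits the output pieces directly; objective: simpler (same complexity).
--
-- Shared low-level pieces (both Pythons contain these same primitive steps): the macro
-- literal, Python's `block[a:b]` / `block[a:]` on nonnegative indices, `block.find(sub, i)`
-- (hand-ported step for step; `none` stands for -1; exact for a nonempty pattern and 0 ≤ i),
-- the whitespace-skip loop and the balanced-brace loop.  Every loop carries a fuel argument
-- only to make it total; fuel `len(block)+1` never runs out, because each iteration moves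
-- its index forward by at least one.
def pvMacro : List Char := "\\resumeItem".toList

def pvSliceN (cs : List Char) (a b : Nat) : List Char :=
  PySem.List.slice cs (some (a : Int)) (some (b : Int))

def pvSliceFrom (cs : List Char) (a : Nat) : List Char :=
  PySem.List.slice cs (some (a : Int)) none

-- `block.find(pat, i)`: first occurrence index ≥ i, none if absent (Python's -1)
def pvFind (cs pat : List Char) : Nat → Nat → Option Nat
  | 0, _ => none
  | fuel + 1, i =>
    if i ≤ cs.length then
      if pat.isPrefixOf (cs.drop i) then some i else pvFind cs pat fuel (i + 1)
    else none

-- `while j < len(block) and block[j].isspace(): j += 1`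
def pvSkipWs (cs : List Char) : Nat → Nat → Nat
  | 0, j => j
  | fuel + 1, j =>
    if j < cs.length ∧ PySem.Chars.isspace (cs.getD j ' ') then pvSkipWs cs fuel (j + 1) else j

-- the inner brace loop of both Pythons: from index k, track depth; return the index of the
-- brace closing to depth 0 (none = loop ran off the end: Python's for/else resp. closed < 0)
def pvBrace (cs : List Char) (depth : Int) : Nat → Nat → Option Nat
  | 0, _ => none
  | fuel + 1, k =>
    if k < cs.length then
      if cs.getD k ' ' = '{' then pvBrace cs (depth + 1) fuel (k + 1)
      else if cs.getD k ' ' = '}' then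
        if depth - 1 = 0 then some k else pvBrace cs (depth - 1) fuel (k + 1)
      else pvBrace cs depth fuel (k + 1)
    else none

-- ===== PORT A =====
-- find_resume_items' outer `while True` loop, state i; emits (start, open_b, close_b, end)
-- tuples; Python's local j (the position after skipped whitespace) is inlined
def find_resume_items_core (cs : List Char) : Nat → Nat → List (Nat × Nat × Nat × Nat)
  | 0, _ => []
  | fuel + 1, i =>
    match pvFind cs pvMacro (cs.length + 1) i with
    | none => []
    | some f =>
      if pvSkipWs cs (cs.length + 1) (f + pvMacro.length) < cs.length ∧
          cs.getD (pvSkipWs cs (cs.length + 1) (f + pvMacro.length)) ' ' = '{' then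
        match pvBrace cs 0 (cs.length + 1) (pvSkipWs cs (cs.length + 1) (f + pvMacro.length)) with
        | some k => (f, pvSkipWs cs (cs.length + 1) (f + pvMacro.length), k, k + 1) ::
            find_resume_items_core cs fuel (k + 1)
        | none => []
      else find_resume_items_core cs fuel (pvSkipWs cs (cs.length + 1) (f + pvMacro.length))

def find_resume_items (block : String) : List (Nat × Nat × Nat × Nat) :=
  find_resume_items_core block.toList (block.toList.length + 1) 0

-- the `for (start, open_b, close_b, end), newtxt in zip(items, replacements)` loop, then the
-- trailing `out.append(block[last:])` and `"".join(out)`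
def pvRenderA (cs : List Char) (zp : List ((Nat × Nat × Nat × Nat) × Option (List Char)))
    (last : Nat) (out : List (List Char)) : List Char :=
  match zp with
  | [] => (out ++ [pvSliceFrom cs last]).flatten
  | ((_s, o, c, e), nt) :: rest =>
      pvRenderA cs rest e
        (out ++ [pvSliceN cs last (o + 1),
                 (match nt with | some t => t | none => pvSliceN cs (o + 1) c),
                 pvSliceN cs c e])

def replace_resume_items (block : String) (replacements : List String) : String :=
  let cs := block.toList
  let items := find_resume_items block
  if items = [] then block
  else
    let rcs := replacements.map String.toList
    -- `replacements = replacements + [None] * (len(items) - len(replacements))` (when shorter)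
    let reps' : List (Option (List Char)) :=
      if rcs.length < items.length then
        rcs.map some ++ List.replicate (items.length - rcs.length) none
      else rcs.map some
    String.ofList (pvRenderA cs (items.zip reps') 0 [])

-- ===== PORT B =====
-- B's single `while True` loop: find the macro, skip whitespace, match braces, and emit the
-- three output pieces immediately (replacements[count] if count < len(replacements), else the
-- original body); loop state (i, last, count, out); Python's j inlined as above
def pvScanB (cs : List Char) (reps : List (List Char)) :
    Nat → Nat → Nat → Nat → List (List Char) → List Char
  | 0, _, last, _, out => (out ++ [pvSliceFrom cs last]).flatten
  | fuel + 1, i, last, count, out =>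
    match pvFind cs pvMacro (cs.length + 1) i with
    | none => (out ++ [pvSliceFrom cs last]).flatten
    | some f =>
      if cs.length ≤ pvSkipWs cs (cs.length + 1) (f + pvMacro.length) ∨
          ¬ cs.getD (pvSkipWs cs (cs.length + 1) (f + pvMacro.length)) ' ' = '{' then
        pvScanB cs reps fuel (pvSkipWs cs (cs.length + 1) (f + pvMacro.length)) last count out
      else
        match pvBrace cs 0 (cs.length + 1) (pvSkipWs cs (cs.length + 1) (f + pvMacro.length)) with
        | none => (out ++ [pvSliceFrom cs last]).flatten   -- `if closed < 0: break`
        | some k =>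
            pvScanB cs reps fuel (k + 1) (k + 1) (count + 1)
              (out ++ [pvSliceN cs last (pvSkipWs cs (cs.length + 1) (f + pvMacro.length) + 1),
                       (if count < reps.length then reps.getD count []
                        else pvSliceN cs (pvSkipWs cs (cs.length + 1) (f + pvMacro.length) + 1) k),
                       pvSliceN cs k (k + 1)])

def replace_resume_items_alt (block : String) (replacements : List String) : String :=
  String.ofList
    (pvScanB block.toList (replacements.map String.toList) (block.toList.length + 1) 0 0 0 [])

-- ===== PRECONDITION & SPEC =====
def Spec_replace_resume_items (block : String) (replacements : List String) (out : String) : Prop := out = replace_resume_items_alt block replacements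
instance (block : String) (replacements : List String) (out : String) : Decidable (Spec_replace_resume_items block replacements out) := by unfold Spec_replace_resume_items; infer_instance

-- ===== CLAIM (what is proved, stated in full; the proofs are below) =====
def Claim_equal_replace_resume_items : Prop := ∀ (block : String) (replacements : List String), Dom_replace_resume_items block replacements → Spec_replace_resume_items block replacements (replace_resume_items block replacements)

-- ===== LEMMAS AND PROOFS =====

-- the common result shape: rendered output from item list `items`, next replacement index
-- `count`, and copy position `last`
def pvRest (cs : List Char) (reps : List (List Char)) :
    List (Nat × Nat × Nat × Nat) → Nat → Nat → List Char
  | [], _, last => pvSliceFrom cs last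
  | (_s, o, c, e) :: rest, count, last =>
      pvSliceN cs last (o + 1) ++
      (if count < reps.length then reps.getD count [] else pvSliceN cs (o + 1) c) ++
      pvSliceN cs c e ++ pvRest cs reps rest (count + 1) e

-- A's render loop over the zipped (item, padded-replacement) list equals pvRest
theorem pvRenderA_eq (cs : List Char) (reps : List (List Char)) :
    ∀ (items : List (Nat × Nat × Nat × Nat)) (count last : Nat) (out : List (List Char)),
    pvRenderA cs (items.zip ((reps.drop count).map some ++
        List.replicate (items.length - (reps.length - count)) none)) last out
      = out.flatten ++ pvRest cs reps items count last := by
  intro items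
  induction items with
  | nil => intro count last out; simp [pvRenderA, pvRest]
  | cons t rest ih =>
    intro count last out
    obtain ⟨s, o, c, e⟩ := t
    by_cases hc : count < reps.length
    · rw [List.drop_eq_getElem_cons hc]
      have hrep : rest.length + 1 - (reps.length - count)
          = rest.length - (reps.length - (count + 1)) := by omega
      simp only [List.length_cons, List.map_cons, List.cons_append, List.zip_cons_cons,
        pvRenderA, hrep, ih (count + 1) e]
      simp [pvRest, hc, List.getD_eq_getElem?_getD]
    · have hd : reps.drop count = [] := List.drop_eq_nil_of_le (by omega)
      have hd1 : reps.drop (count + 1) = [] := List.drop_eq_nil_of_le (by omega)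
      have hrep : rest.length + 1 - (reps.length - count) = rest.length + 1 := by omega
      have hrep2 : rest.length - (reps.length - (count + 1)) = rest.length := by omega
      have hih := ih (count + 1) e
        (out ++ [pvSliceN cs last (o + 1), pvSliceN cs (o + 1) c, pvSliceN cs c e])
      rw [hd1, hrep2] at hih
      simp only [List.map_nil, List.nil_append] at hih
      simp only [hd, List.length_cons, hrep, List.map_nil, List.nil_append,
        List.replicate_succ, List.zip_cons_cons, pvRenderA]
      rw [hih]
      simp [pvRest, hc]

-- B's fused scan equals pvRest over A's item list (same fuel: the two outer loops make the
-- same find/skip/brace steps in the same order)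
theorem pvScanB_eq (cs : List Char) (reps : List (List Char)) :
    ∀ (fuel i last count : Nat) (out : List (List Char)),
    pvScanB cs reps fuel i last count out
      = out.flatten ++ pvRest cs reps (find_resume_items_core cs fuel i) count last := by
  intro fuel
  induction fuel with
  | zero => intro i last count out; simp [pvScanB, find_resume_items_core, pvRest]
  | succ fuel ih =>
    intro i last count out
    rw [pvScanB, find_resume_items_core]
    cases hf : pvFind cs pvMacro (cs.length + 1) i with
    | none => simp [pvRest]
    | some f =>
      simp only
      by_cases hg : pvSkipWs cs (cs.length + 1) (f + pvMacro.length) < cs.length ∧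
          cs.getD (pvSkipWs cs (cs.length + 1) (f + pvMacro.length)) ' ' = '{'
      · rw [if_neg (by simp only [not_or, not_le, Decidable.not_not]; exact ⟨hg.1, hg.2⟩),
          if_pos hg]
        cases hbr : pvBrace cs 0 (cs.length + 1)
            (pvSkipWs cs (cs.length + 1) (f + pvMacro.length)) with
        | none => simp [pvRest]
        | some k =>
          simp [ih, pvRest, List.flatten_append, List.append_assoc]
      · rw [if_pos (by rcases not_and_or.mp hg with h | h
                       exacts [Or.inl (by omega), Or.inr h]), if_neg hg]
        exact ih (pvSkipWs cs (cs.length + 1) (f + pvMacro.length)) last count out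

-- A's conditional padding is the uniform padded list
theorem pvPad_eq (rcs : List (List Char)) (n : Nat) :
    (if rcs.length < n then rcs.map some ++ List.replicate (n - rcs.length) none
     else rcs.map some)
      = (rcs.drop 0).map some ++ List.replicate (n - (rcs.length - 0)) none := by
  by_cases h : rcs.length < n
  · simp [h]
  · have : n - rcs.length = 0 := by omega
    simp [h, this]

-- ===== VERDICT (by name: the statement is the Claim_ definition above) =====
theorem replace_resume_items_spec : Claim_equal_replace_resume_items := by
  intro block replacements _dom
  unfold Spec_replace_resume_items replace_resume_items replace_resume_items_alt
  rw [pvScanB_eq block.toList (replacements.map String.toList) (block.toList.length + 1) 0 0 0 []]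
  simp only [List.flatten_nil, List.nil_append]
  by_cases hi : find_resume_items block = []
  · rw [if_pos hi]
    unfold find_resume_items at hi
    rw [hi]
    simp [pvRest, pvSliceFrom, String.ofList_toList]
  · rw [if_neg hi]
    rw [pvPad_eq (replacements.map String.toList) (find_resume_items block).length]
    rw [pvRenderA_eq block.toList (replacements.map String.toList) (find_resume_items block) 0 0 []]
    unfold find_resume_items
    simp
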